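-- pv_equiv track=rewrite | github.com/pypi-data/pypi-mirror-79 | packages/geotolkparser/geotolkparser-0.9.tar.gz/geotolkparser-0.9/geotolkparser/load.py | associate_filenames_in_folder
-- ===== SOURCE A (Python) =====
-- from typing import List
--
-- VALID_FILETYPES = [".snd", ".tlk", ".prv"]
--
-- def associate_filenames_in_folder(filenames: List[str]) -> dict:
--     # Split filenames into prefix (filename) and suffix (.snd/.tlk/.prv etc)
--     # Usually the last four characters is the suffix, and the previous is the prefix
--     # Get all unique prefixes:
--     prefixes = set([f[:-4] for f in filenames])
--
--     #For each unique prefix, find all files with that prefix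
--     associated_files = {}
--
--     for unique_filename in prefixes:
--         grouped_filenames = []
--         for full_filename in filenames:
--             full_filename_prefix = full_filename[:-4]
--             if full_filename_prefix == unique_filename:
--                 grouped_filenames.append(full_filename)
--         grouped_filenames = prune_filetypes(grouped_filenames)
--         grouped_filenames = remove_filenames_without_snd_file(grouped_filenames)
--         if grouped_filenames:
--             associated_files[unique_filename] = grouped_filenames
--
--     return associated_files
--
-- def remove_filenames_without_snd_file(files: List[str]) -> List[str]:
--     # If none of the files ends with .snd, ignore the rest of the files
--     for filename in files:
--         if filename[-4:].lower() == ".snd":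
--             return files
--     return []
--
-- def prune_filetypes(files: List[str]) -> List[str]:
--     # Remove files with invalid filetypes from the list
--     return [f for f in files if f[-4:].lower() in VALID_FILETYPES]
-- ===== SOURCE B (Python) =====
-- from typing import List
--
-- VALID_FILETYPES = [".snd", ".tlk", ".prv"]
--
-- def associate_filenames_in_folder(filenames: List[str]) -> dict:
--     # One pass: group files by prefix, then filter each group once.
--     groups = {}
--     for f in filenames:
--         groups.setdefault(f[:-4], []).append(f)
--     associated_files = {}
--     for prefix, files in groups.items():
--         kept = [f for f in files if f[-4:].lower() in VALID_FILETYPES]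
--         if any(f[-4:].lower() == ".snd" for f in kept):
--             associated_files[prefix] = kept
--     return associated_files
-- ===== Notes on version B (the rewrite author's own statement) =====
-- stated objective: faster
-- what changed: Replaces A's per-distinct-prefix rescans of the whole filename list with a single grouping pass into a dict of lists, then one filtering pass over the groups.
import Mathlib
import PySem

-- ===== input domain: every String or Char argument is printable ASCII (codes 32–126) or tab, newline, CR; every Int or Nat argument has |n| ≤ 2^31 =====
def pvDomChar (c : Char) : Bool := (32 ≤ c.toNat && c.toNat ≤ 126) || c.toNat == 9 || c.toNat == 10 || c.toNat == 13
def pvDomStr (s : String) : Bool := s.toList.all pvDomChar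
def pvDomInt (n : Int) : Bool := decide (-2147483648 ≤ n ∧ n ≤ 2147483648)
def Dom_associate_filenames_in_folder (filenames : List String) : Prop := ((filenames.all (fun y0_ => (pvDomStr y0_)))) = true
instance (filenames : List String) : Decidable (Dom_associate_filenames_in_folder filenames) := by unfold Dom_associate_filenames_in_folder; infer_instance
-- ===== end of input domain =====

-- B groups the filenames by prefix in ONE pass over the list (a dict of lists) instead of
-- re-scanning the whole list once per distinct prefix; return value only (no mutation).

-- ===== PORT A =====
def VALID_FILETYPES : List String := [".snd", ".tlk", ".prv"]

-- f[:-4]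
def pvPrefix (f : String) : String := PySem.Str.slice f none (some (-4))
-- f[-4:].lower()
def pvSuffix (f : String) : String := PySem.Str.lower (PySem.Str.slice f (some (-4)) none)

-- helper remove_filenames_without_snd_file: the loop returns `files` at the first .snd hit
def pvRmGo (files : List String) : List String → List String
  | [] => []
  | f :: rest => if pvSuffix f == ".snd" then files else pvRmGo files rest

def remove_filenames_without_snd_file (files : List String) : List String :=
  pvRmGo files files

def prune_filetypes (files : List String) : List String :=
  files.filter (fun f => VALID_FILETYPES.contains (pvSuffix f))

def associate_filenames_in_folder (filenames : List String) : List (String × List String) :=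
  let prefixes : PySem.Set String := PySem.Set.ofList (filenames.map pvPrefix)
  let associated_files : PySem.Dict String (List String) :=
    prefixes.foldl (fun d unique_filename =>
      let grouped_filenames :=
        filenames.foldl (fun acc full_filename =>
          if pvPrefix full_filename == unique_filename then acc ++ [full_filename] else acc) []
      let grouped_filenames := prune_filetypes grouped_filenames
      let grouped_filenames := remove_filenames_without_snd_file grouped_filenames
      if grouped_filenames ≠ [] then d.insert unique_filename grouped_filenames else d)
      PySem.Dict.empty
  associated_files.items

-- ===== PORT B =====
def associate_filenames_in_folder_alt (filenames : List String) : List (String × List String) :=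
  let groups : PySem.Dict String (List String) :=
    filenames.foldl (fun d f => d.modify (pvPrefix f) [] (· ++ [f])) PySem.Dict.empty
  let associated_files : PySem.Dict String (List String) :=
    groups.items.foldl (fun d pf =>
      let kept := pf.2.filter (fun f => VALID_FILETYPES.contains (pvSuffix f))
      if kept.any (fun f => pvSuffix f == ".snd") then d.insert pf.1 kept else d)
      PySem.Dict.empty
  associated_files.items

-- ===== PRECONDITION & SPEC =====
def Spec_associate_filenames_in_folder (filenames : List String) (out : List (String × List String)) : Prop := out = associate_filenames_in_folder_alt filenames
instance (filenames : List String) (out : List (String × List String)) : Decidable (Spec_associate_filenames_in_folder filenames out) := by unfold Spec_associate_filenames_in_folder; infer_instance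

-- ===== CLAIM (what is proved, stated in full; the proofs are below) =====
def Claim_equal_associate_filenames_in_folder : Prop := ∀ (filenames : List String), Dom_associate_filenames_in_folder filenames → Spec_associate_filenames_in_folder filenames (associate_filenames_in_folder filenames)

-- ===== LEMMAS AND PROOFS =====

-- the A-side helper loop returns `files` iff some element has suffix ".snd"
theorem pvRmGo_eq (files : List String) (l : List String) :
    pvRmGo files l = if l.any (fun f => pvSuffix f == ".snd") then files else [] := by
  induction l with
  | nil => simp [pvRmGo]
  | cons f rest ih => by_cases h : pvSuffix f == ".snd" <;> simp [pvRmGo, h, ih]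

-- B's grouping dict holds, for each prefix, exactly the sublist of files with that prefix
theorem groups_getD (filenames : List String) (c : String) :
    (filenames.foldl (fun d f => d.modify (pvPrefix f) [] (· ++ [f]))
      (PySem.Dict.empty : PySem.Dict String (List String))).getD c []
      = filenames.filter (fun f => pvPrefix f == c) := by
  have h := PySem.Dict.getD_foldl_modify_append
    (l := filenames.map (fun f => (pvPrefix f, f)))
    (d := (PySem.Dict.empty : PySem.Dict String (List String))) (c := c)
  rw [List.foldl_map] at h
  simpa [List.filter_map, List.map_map, Function.comp_def] using h

-- its items list: one entry per distinct prefix, in first-occurrence order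
theorem groups_items (filenames : List String) :
    (filenames.foldl (fun d f => d.modify (pvPrefix f) [] (· ++ [f]))
      (PySem.Dict.empty : PySem.Dict String (List String))).items
      = (PySem.Set.ofList (filenames.map pvPrefix)).map
          (fun p => (p, filenames.filter (fun f => pvPrefix f == p))) := by
  set d := filenames.foldl (fun d f => d.modify (pvPrefix f) [] (· ++ [f]))
      (PySem.Dict.empty : PySem.Dict String (List String)) with hd
  have hnd : d.keys.Nodup := by
    have := PySem.Dict.nodup_keys_foldl_modify_key filenames pvPrefix []
      (fun _ x => (· ++ [x])) PySem.Dict.empty (by simp)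
    simpa [hd] using this
  have hkeys : d.keys = PySem.Set.ofList (filenames.map pvPrefix) := by
    have := PySem.Dict.keys_foldl_modify_key filenames pvPrefix []
      (fun _ x => (· ++ [x])) PySem.Dict.empty
    simpa [hd, PySem.Dict.keys_empty, PySem.Set.ofList, PySem.Set.update, PySem.Set.empty]
      using this
  rw [PySem.Dict.items_eq_map_keys d hnd [], hkeys]
  exact List.map_congr_left (fun p _ => by rw [hd, groups_getD])

-- one step of A's loop over a prefix equals one step of B's loop at that prefix's group
theorem step_eq (filenames : List String) (d : PySem.Dict String (List String)) (p : String) :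
    (let grouped :=
        filenames.foldl (fun acc f => if pvPrefix f == p then acc ++ [f] else acc) []
     let pruned := prune_filetypes grouped
     let g := remove_filenames_without_snd_file pruned
     if g ≠ [] then d.insert p g else d)
    = (let kept := (filenames.filter (fun f => pvPrefix f == p)).filter
          (fun f => VALID_FILETYPES.contains (pvSuffix f))
       if kept.any (fun f => pvSuffix f == ".snd") then d.insert p kept else d) := by
  simp only [PySem.List.foldl_append_if (fun f => pvPrefix f == p) (fun f => f) filenames [],
    List.nil_append, List.map_id', prune_filetypes, remove_filenames_without_snd_file, pvRmGo_eq]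
  by_cases h : ((filenames.filter (fun f => pvPrefix f == p)).filter
      (fun f => VALID_FILETYPES.contains (pvSuffix f))).any (fun f => pvSuffix f == ".snd") = true
  · have hne : (filenames.filter (fun f => pvPrefix f == p)).filter
        (fun f => VALID_FILETYPES.contains (pvSuffix f)) ≠ [] := by
      rcases List.any_eq_true.mp h with ⟨x, hx, _⟩
      exact List.ne_nil_of_mem hx
    rw [h]
    simp only [reduceIte]
    rw [if_pos hne]
  · rw [Bool.not_eq_true] at h
    rw [h]
    simp

-- ===== VERDICT (by name: the statement is the Claim_ definition above) =====
theorem associate_filenames_in_folder_spec : Claim_equal_associate_filenames_in_folder := by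
  intro filenames _
  unfold Spec_associate_filenames_in_folder
  simp only [associate_filenames_in_folder, associate_filenames_in_folder_alt,
    groups_items, List.foldl_map]
  congr 1
  exact PySem.List.foldl_congr_mem _ _ _ _ (fun d p _ => step_eq filenames d p)
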